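-- pv_equiv track=rewrite | github.com/SeanTheSun22/CS130-SS23 | Lab 13/Q8.py | evaluate_f
-- ===== SOURCE A (Python) =====
-- def evaluate_f(n):
--     if round(n) == 1:
--         return (1, 0)
--     if n % 2 == 0:
--         tuple = evaluate_f(int(n / 2))
--         return (2 * tuple[0] + n ** 2, tuple[1] + 1)
--     tuple = evaluate_f(int(n - 1))
--     return (tuple[0] + n, tuple[1] + 1)
-- ===== SOURCE B (Python) =====
-- def evaluate_f(n):
--     # Iterative two-pass version: record the chain down to 1, then fold it back up.
--     chain = []
--     m = n
--     while round(m) != 1: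
--         even = m % 2 == 0
--         chain.append((m, even))
--         m = int(m / 2) if even else int(m - 1)
--     acc = (1, 0)
--     for (v, even) in reversed(chain):
--         if even:
--             acc = (2 * acc[0] + v ** 2, acc[1] + 1)
--         else:
--             acc = (acc[0] + v, acc[1] + 1)
--     return acc
-- ===== Notes on version B (the rewrite author's own statement) =====
-- stated objective: alternative
-- what changed: Replaces the recursion with an explicit iteration: a first loop records the (value, parity) chain down to 1, then a fold over the reversed chain rebuilds the weighted sum and step count.
import Mathlib
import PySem

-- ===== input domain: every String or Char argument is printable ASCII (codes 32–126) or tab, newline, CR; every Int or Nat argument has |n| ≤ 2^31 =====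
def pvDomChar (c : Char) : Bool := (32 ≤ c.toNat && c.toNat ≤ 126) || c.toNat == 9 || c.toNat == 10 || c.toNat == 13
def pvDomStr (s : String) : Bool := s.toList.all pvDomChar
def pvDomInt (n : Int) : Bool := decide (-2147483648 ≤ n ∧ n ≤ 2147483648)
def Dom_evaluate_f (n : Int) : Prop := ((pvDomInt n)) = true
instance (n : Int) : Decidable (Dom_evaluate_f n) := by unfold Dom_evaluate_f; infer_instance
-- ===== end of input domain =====

-- B is an iterative (record-the-chain, then fold it back) version of A's recursion; same cost, different decomposition.
-- For n ≤ 0 the Python A raises RecursionError (and B loops); those inputs are outside Pre_.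

-- ===== PORT A =====
-- Fuel-based transliteration of A's recursion; fuel n.toNat + 1 suffices for every n ≥ 1,
-- since each recursive call strictly decreases n (the fuel-out value (0, 0) is unreachable under Pre_).
def evalFA : Nat → Int → Int × Int
  | 0, _ => (0, 0)
  | f + 1, n =>
    if n = 1 then (1, 0)
    else if PySem.Int.mod n 2 = 0 then
      -- even branch: int(n / 2) equals n // 2 exactly for even |n| ≤ 2^31
      let t := evalFA f (PySem.Int.floordiv n 2)
      (2 * t.1 + n ^ 2, t.2 + 1)
    else
      let t := evalFA f (n - 1)
      (t.1 + n, t.2 + 1)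

def evaluate_f (n : Int) : Int × Int := evalFA (n.toNat + 1) n

-- ===== PORT B =====
-- pass 1: record the (value, parity) chain down to 1 (same fuel bound as A's recursion)
def chainB : Nat → Int → List (Int × Bool)
  | 0, _ => []
  | f + 1, m =>
    if m = 1 then []
    else
      let even : Bool := PySem.Int.mod m 2 = 0
      (m, even) :: chainB f (if even then PySem.Int.floordiv m 2 else m - 1)

-- pass 2: fold the reversed chain
def stepB (acc : Int × Int) (p : Int × Bool) : Int × Int :=
  if p.2 then (2 * acc.1 + p.1 ^ 2, acc.2 + 1) else (acc.1 + p.1, acc.2 + 1)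

def evaluate_f_alt (n : Int) : Int × Int :=
  ((chainB (n.toNat + 1) n).reverse).foldl stepB (1, 0)

-- ===== PRECONDITION & SPEC =====
-- Pre_: exactly the inputs on which Python A returns (for n ≤ 0 the chain never reaches 1 and A raises RecursionError).
def Pre_evaluate_f (n : Int) : Prop := 1 ≤ n
instance (n : Int) : Decidable (Pre_evaluate_f n) := by unfold Pre_evaluate_f; infer_instance
def pvWitness_evaluate_f : Int := 7

def Spec_evaluate_f (n : Int) (out : Int × Int) : Prop := out = evaluate_f_alt n
instance (n : Int) (out : Int × Int) : Decidable (Spec_evaluate_f n out) := by unfold Spec_evaluate_f; infer_instance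

-- ===== CLAIM (what is proved, stated in full; the proofs are below) =====
def Claim_equal_evaluate_f : Prop := ∀ (n : Int), Dom_evaluate_f n → Pre_evaluate_f n → Spec_evaluate_f n (evaluate_f n)

-- ===== LEMMAS AND PROOFS =====

-- The key invariant: for any sufficient fuel and any n ≥ 1, A's recursion equals B's fold over the recorded chain.
theorem evalFA_eq_fold (f : Nat) : ∀ (n : Int), 1 ≤ n → n.toNat ≤ f →
    evalFA (f + 1) n = ((chainB (f + 1) n).reverse).foldl stepB (1, 0) := by
  induction f with
  | zero =>
    intro n h1 hf
    have : n = 1 := by omega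
    subst this
    simp [evalFA, chainB]
  | succ f ih =>
    intro n h1 hf
    by_cases hone : n = 1
    · subst hone; simp [evalFA, chainB]
    · have h2 : 2 ≤ n := by omega
      have hmod : PySem.Int.mod n 2 = n % 2 := PySem.Int.mod_eq_emod_of_pos (by omega)
      by_cases hev : PySem.Int.mod n 2 = 0
      · -- even branch
        have hdvd : n % 2 = 0 := by omega
        have hdiv : PySem.Int.floordiv n 2 = n / 2 := PySem.Int.floordiv_eq_ediv_of_pos (by omega)
        have hIH := ih (n / 2) (by omega) (by omega)
        have hA : evalFA (f + 1 + 1) n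
            = (2 * (evalFA (f + 1) (n / 2)).1 + n ^ 2, (evalFA (f + 1) (n / 2)).2 + 1) := by
          simp only [evalFA]
          rw [if_neg hone, if_pos hev, hdiv]
        have hC : chainB (f + 1 + 1) n = (n, true) :: chainB (f + 1) (n / 2) := by
          have hb : (decide (PySem.Int.mod n 2 = 0)) = true := by rw [hev]; decide
          simp only [chainB, if_neg hone, hb, if_true, hdiv]
        rw [hA, hC, hIH, List.reverse_cons, List.foldl_append]
        simp [stepB]
      · -- odd branch
        have hIH := ih (n - 1) (by omega) (by omega)
        have hA : evalFA (f + 1 + 1) n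
            = ((evalFA (f + 1) (n - 1)).1 + n, (evalFA (f + 1) (n - 1)).2 + 1) := by
          simp only [evalFA]
          rw [if_neg hone, if_neg hev]
        have hC : chainB (f + 1 + 1) n = (n, false) :: chainB (f + 1) (n - 1) := by
          have hb : (decide (PySem.Int.mod n 2 = 0)) = false := decide_eq_false hev
          simp only [chainB, if_neg hone, hb, Bool.false_eq_true, if_false]
        rw [hA, hC, hIH, List.reverse_cons, List.foldl_append]
        simp [stepB]

-- ===== VERDICT (by name: the statement is the Claim_ definition above) =====
theorem evaluate_f_spec : Claim_equal_evaluate_f := by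
  intro n _ hpre
  unfold Spec_evaluate_f evaluate_f evaluate_f_alt
  exact evalFA_eq_fold n.toNat n hpre le_rfl
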